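-- pv_equiv track=rewrite | github.com/Gabriellemos11/EP2-DesSoft | funcoes.py | calcula_pontos_quadra
-- ===== SOURCE A (Python) =====
-- def calcula_pontos_quadra(dados):
--     contagens = {}
--     for valor in dados:
--         contagens[valor] = contagens.get(valor, 0) + 1
--
--     for quantidade in contagens.values():
--         if quantidade >= 4:
--             total = 0
--             for numero in dados:
--                 total += numero
--             return total
--
--     return 0
-- ===== SOURCE B (Python) =====
-- def calcula_pontos_quadra(dados):
--     ordenados = sorted(dados)
--     for i in range(3, len(ordenados)):
--         if ordenados[i] == ordenados[i - 3]:
--             return sum(dados)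
--     return 0
-- ===== Notes on version B (the rewrite author's own statement) =====
-- stated objective: alternative
-- what changed: Replaces A's frequency dict + value scan + hand-written summing loop with sort-then-scan: sort the list once and look for two equal elements three positions apart (which happens iff some value occurs >= 4 times), returning sum(dados) on the first hit.
import Mathlib
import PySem

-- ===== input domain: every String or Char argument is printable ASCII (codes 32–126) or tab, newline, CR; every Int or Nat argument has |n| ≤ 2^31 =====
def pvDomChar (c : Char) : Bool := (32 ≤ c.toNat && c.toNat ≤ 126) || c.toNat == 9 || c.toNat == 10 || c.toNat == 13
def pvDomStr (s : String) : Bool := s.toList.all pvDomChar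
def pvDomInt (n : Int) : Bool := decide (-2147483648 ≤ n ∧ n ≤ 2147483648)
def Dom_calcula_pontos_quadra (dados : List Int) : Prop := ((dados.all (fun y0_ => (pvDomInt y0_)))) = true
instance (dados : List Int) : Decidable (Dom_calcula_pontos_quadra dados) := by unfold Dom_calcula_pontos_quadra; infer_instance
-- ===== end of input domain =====

-- B drops the frequency dict: it sorts the list and scans for four equal values three positions apart (a value occurs >= 4 times iff the sorted list has such a pair); alternative algorithm, sort-then-scan instead of hash counting.

-- ===== PORT A =====
-- second loop of A: scan the dict's values, return the (hand-summed) total at the first count >= 4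
def aScanValues (dados : List Int) : List Int → Int
  | [] => 0
  | q :: rest => if 4 ≤ q then dados.foldl (fun total numero => total + numero) 0 else aScanValues dados rest

def calcula_pontos_quadra (dados : List Int) : Int :=
  let contagens := dados.foldl (fun d valor => d.insert valor (d.getD valor 0 + 1)) PySem.Dict.empty
  aScanValues dados contagens.values

-- ===== PORT B =====
-- for i in range(3, len(ordenados)): if ordenados[i] == ordenados[i-3]: return sum(dados)
def bLoop (dados ordenados : List Int) : List Int → Int
  | [] => 0
  | i :: rest =>
      if PySem.List.pyGet? ordenados i = PySem.List.pyGet? ordenados (i - 3)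
      then dados.foldl (· + ·) 0
      else bLoop dados ordenados rest

def calcula_pontos_quadra_alt (dados : List Int) : Int :=
  let ordenados := PySem.List.sorted dados (fun x => x)
  bLoop dados ordenados (PySem.List.pyRange 3 ordenados.length 1)

-- ===== PRECONDITION & SPEC =====
def Spec_calcula_pontos_quadra (dados : List Int) (out : Int) : Prop := out = calcula_pontos_quadra_alt dados
instance (dados : List Int) (out : Int) : Decidable (Spec_calcula_pontos_quadra dados out) := by unfold Spec_calcula_pontos_quadra; infer_instance

-- ===== CLAIM (what is proved, stated in full; the proofs are below) =====
def Claim_equal_calcula_pontos_quadra : Prop := ∀ (dados : List Int), Dom_calcula_pontos_quadra dados → Spec_calcula_pontos_quadra dados (calcula_pontos_quadra dados)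

-- ===== LEMMAS AND PROOFS =====

-- canonical value both sides compute
def quadKey (dados : List Int) : Int :=
  if ∃ v ∈ dados, 4 ≤ dados.count v then dados.foldl (· + ·) 0 else 0

lemma aScan_char (dados : List Int) (vs : List Int) :
    aScanValues dados vs = if ∃ q ∈ vs, (4:Int) ≤ q then dados.foldl (· + ·) 0 else 0 := by
  induction vs with
  | nil => simp [aScanValues]
  | cons q rest ih =>
      simp only [aScanValues, ih]
      by_cases h : (4:Int) ≤ q
      · simp [h]
      · simp [h]

lemma a_char (dados : List Int) : calcula_pontos_quadra dados = quadKey dados := by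
  unfold calcula_pontos_quadra quadKey
  rw [PySem.Dict.foldl_insert_getD_add_one_eq_counter, aScan_char]
  have hv : (PySem.Dict.counter dados).values
      = (PySem.Set.ofList dados).map (fun k => (dados.count k : Int)) := by
    show ((PySem.Dict.counter dados).items).map (·.2) = _
    rw [PySem.Dict.items_counter]
    simp
  rw [hv]
  congr 1
  simp only [List.mem_map, eq_iff_iff]
  constructor
  · rintro ⟨q, ⟨k, hk, rfl⟩, hq⟩
    exact ⟨k, (PySem.Set.mem_ofList _ _).mp hk, by exact_mod_cast hq⟩
  · rintro ⟨v, hv', hc⟩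
    exact ⟨(dados.count v : Int), ⟨v, (PySem.Set.mem_ofList _ _).mpr hv', rfl⟩, by exact_mod_cast hc⟩

lemma bLoop_char (dados s : List Int) (is : List Int) :
    bLoop dados s is
      = if ∃ i ∈ is, PySem.List.pyGet? s i = PySem.List.pyGet? s (i - 3)
        then dados.foldl (· + ·) 0 else 0 := by
  induction is with
  | nil => simp [bLoop]
  | cons i rest ih =>
      simp only [bLoop, ih]
      by_cases h : PySem.List.pyGet? s i = PySem.List.pyGet? s (i - 3)
      · simp [h]
      · simp [h]

-- in a sorted list, equal endpoints squeeze everything between them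
lemma sorted_squeeze (xs : List Int) {p j q : ℕ} (hpj : p ≤ j) (hjq : j ≤ q)
    (hq : q < (PySem.List.sorted xs (fun x => x)).length)
    (h : (PySem.List.sorted xs (fun x => x))[p]'(by omega)
       = (PySem.List.sorted xs (fun x => x))[q]) :
    (PySem.List.sorted xs (fun x => x))[j]'(by omega)
      = (PySem.List.sorted xs (fun x => x))[q] := by
  refine le_antisymm (PySem.List.sorted_id_getElem_mono xs hjq hq) ?_
  calc (PySem.List.sorted xs (fun x => x))[q]
      = (PySem.List.sorted xs (fun x => x))[p]'(by omega) := h.symm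
    _ ≤ (PySem.List.sorted xs (fun x => x))[j]'(by omega) :=
        PySem.List.sorted_id_getElem_mono xs hpj (by omega)

-- a count ≥ 4 yields two equal entries three apart in the sorted list
lemma run_of_count (dados : List Int) (v : Int)
    (hv : 4 ≤ (PySem.List.sorted dados (fun x => x)).count v) :
    ∃ k : ℕ, 3 ≤ k ∧ k < (PySem.List.sorted dados (fun x => x)).length ∧
      (PySem.List.sorted dados (fun x => x))[k]? = (PySem.List.sorted dados (fun x => x))[k-3]? := by
  have hsub : (List.replicate 4 v).Sublist (PySem.List.sorted dados (fun x => x)) :=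
    List.replicate_sublist_iff.mpr hv
  rw [List.sublist_iff_exists_fin_orderEmbedding_get_eq] at hsub
  obtain ⟨f, hf⟩ := hsub
  have hlen : (List.replicate 4 v).length = 4 := by simp
  have h01 : f ⟨0, by omega⟩ < f ⟨1, by omega⟩ := f.strictMono (by exact Fin.mk_lt_mk.mpr (by omega))
  have h12 : f ⟨1, by omega⟩ < f ⟨2, by omega⟩ := f.strictMono (by exact Fin.mk_lt_mk.mpr (by omega))
  have h23 : f ⟨2, by omega⟩ < f ⟨3, by omega⟩ := f.strictMono (by exact Fin.mk_lt_mk.mpr (by omega))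
  have hlt01 : ((f ⟨0, by omega⟩ : Fin _) : ℕ) < ((f ⟨1, by omega⟩ : Fin _) : ℕ) := h01
  have hlt12 : ((f ⟨1, by omega⟩ : Fin _) : ℕ) < ((f ⟨2, by omega⟩ : Fin _) : ℕ) := h12
  have hlt23 : ((f ⟨2, by omega⟩ : Fin _) : ℕ) < ((f ⟨3, by omega⟩ : Fin _) : ℕ) := h23
  refine ⟨((f ⟨3, by omega⟩ : Fin _) : ℕ), by omega, (f ⟨3, by omega⟩).isLt, ?_⟩
  have hk := (f ⟨3, by omega⟩).isLt
  have h0le : ((f ⟨0, by omega⟩ : Fin _) : ℕ) ≤ ((f ⟨3, by omega⟩ : Fin _) : ℕ) - 3 := by omega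
  have hg3 : (PySem.List.sorted dados (fun x => x))[((f ⟨3, by omega⟩ : Fin _) : ℕ)] = v := by
    have h := (hf ⟨3, by omega⟩).symm
    simpa [List.get_eq_getElem] using h
  have hg0 : (PySem.List.sorted dados (fun x => x))[((f ⟨0, by omega⟩ : Fin _) : ℕ)]'(by omega) = v := by
    have h := (hf ⟨0, by omega⟩).symm
    simpa [List.get_eq_getElem] using h
  have hmid : (PySem.List.sorted dados (fun x => x))[((f ⟨3, by omega⟩ : Fin _) : ℕ) - 3]'(by omega)
      = (PySem.List.sorted dados (fun x => x))[((f ⟨3, by omega⟩ : Fin _) : ℕ)] :=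
    sorted_squeeze dados h0le (by omega) hk (by rw [hg0, hg3])
  rw [List.getElem?_eq_getElem hk, List.getElem?_eq_getElem (by omega : ((f ⟨3, by omega⟩ : Fin _) : ℕ) - 3 < _), hmid]

-- two equal entries three apart in the sorted list yield a value of count ≥ 4
lemma count_of_run (dados : List Int) (k : ℕ) (hk3 : 3 ≤ k)
    (hk : k < (PySem.List.sorted dados (fun x => x)).length)
    (heq : (PySem.List.sorted dados (fun x => x))[k]? = (PySem.List.sorted dados (fun x => x))[k-3]?) :
    ∃ v ∈ PySem.List.sorted dados (fun x => x),
      4 ≤ (PySem.List.sorted dados (fun x => x)).count v := by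
  set s := PySem.List.sorted dados (fun x => x) with hs
  have h3 : k - 3 < s.length := by omega
  rw [List.getElem?_eq_getElem hk, List.getElem?_eq_getElem h3, Option.some_inj] at heq
  refine ⟨s[k], List.getElem_mem hk, ?_⟩
  have hrep : (List.replicate 4 s[k]).Sublist s := by
    rw [List.sublist_iff_exists_fin_orderEmbedding_get_eq]
    refine ⟨OrderEmbedding.ofStrictMono
      (fun j => (⟨k - 3 + (j : ℕ), by have hj : (j : ℕ) < (List.replicate 4 s[k]).length := j.isLt; simp only [List.length_replicate] at hj; omega⟩ : Fin s.length)) ?_, ?_⟩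
    · intro a b hab
      exact Fin.mk_lt_mk.mpr (by have : (a : ℕ) < (b : ℕ) := hab; omega)
    · intro ix
      have hix : (ix : ℕ) < 4 := by
        have h := ix.isLt; simp only [List.length_replicate] at h; exact h
      have hmid : s[k - 3 + (ix : ℕ)]'(by omega) = s[k] :=
        sorted_squeeze dados (Nat.le_add_right _ _) (by omega) hk heq.symm
      have hL : (List.replicate 4 s[k]).get ix = s[k] := by
        rw [List.get_eq_getElem]; exact List.getElem_replicate ..
      rw [hL, List.get_eq_getElem]
      exact hmid.symm
  have := List.replicate_sublist_iff.mp hrep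
  simpa using this

lemma b_char (dados : List Int) : calcula_pontos_quadra_alt dados = quadKey dados := by
  unfold calcula_pontos_quadra_alt quadKey
  rw [bLoop_char]
  set s := PySem.List.sorted dados (fun x => x) with hs
  have hperm : s.Perm dados := PySem.List.sorted_perm dados (fun x => x) false
  congr 1
  simp only [eq_iff_iff]
  constructor
  · rintro ⟨i, hi, hg⟩
    rw [PySem.List.mem_pyRange_one] at hi
    have h0 : (0:Int) ≤ i := by omega
    have hlen : i < (s.length : Int) := hi.2
    have hk3 : 3 ≤ i.toNat := by omega
    have hk : i.toNat < s.length := by omega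
    have e1 : PySem.List.pyGet? s i = s[i.toNat]? := PySem.List.pyGet?_of_nonneg s h0
    have e2 : PySem.List.pyGet? s (i - 3) = s[(i-3).toNat]? := PySem.List.pyGet?_of_nonneg s (by omega)
    have e3 : (i - 3).toNat = i.toNat - 3 := by omega
    rw [e1, e2, e3] at hg
    obtain ⟨v, hvmem, hvcnt⟩ := count_of_run dados i.toNat hk3 hk hg
    exact ⟨v, hperm.mem_iff.mp hvmem, by rw [← hperm.count_eq]; exact hvcnt⟩
  · rintro ⟨v, hvmem, hvcnt⟩
    have hvs : 4 ≤ s.count v := by rw [hperm.count_eq]; exact hvcnt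
    obtain ⟨k, hk3, hk, hg⟩ := run_of_count dados v hvs
    refine ⟨(k : Int), ?_, ?_⟩
    · rw [PySem.List.mem_pyRange_one]
      constructor
      · exact_mod_cast hk3
      · exact_mod_cast hk
    · have e1 : PySem.List.pyGet? s (k : Int) = s[k]? := by
        simp [PySem.List.pyGet?_natCast]
      have e2 : PySem.List.pyGet? s ((k : Int) - 3) = s[k-3]? := by
        have : ((k : Int) - 3) = ((k - 3 : ℕ) : Int) := by omega
        rw [this]
        simp [PySem.List.pyGet?_natCast]
      rw [e1, e2]
      exact hg

-- ===== VERDICT (by name: the statement is the Claim_ definition above) =====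
theorem calcula_pontos_quadra_spec : Claim_equal_calcula_pontos_quadra := by
  intro dados _
  unfold Spec_calcula_pontos_quadra
  rw [a_char, b_char]
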